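-- pv_equiv track=rewrite | github.com/PSebaRaj/CPSC-490-Cribbage | enumerate.py | are_valid_hands
-- ===== SOURCE A (Python) =====
-- def are_valid_hands(hand1, hand2):
--     # ensures that we do not have more than 4 of any card
--     counts = {}
--     for c in hand1:
--         counts[c] = counts.get(c, 0) + 1
--     for c in hand2:
--         counts[c] = counts.get(c, 0) + 1
--     for k,v in counts.items():
--         if v > 4: return False
--     return True
-- ===== SOURCE B (Python) =====
-- def are_valid_hands(hand1, hand2):
--     # sort the combined cards, then scan once tracking the run length of
--     # equal consecutive cards; fail as soon as a run exceeds 4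
--     cards = sorted(hand1 + hand2)
--     prev = None
--     run = 0
--     for c in cards:
--         if c == prev:
--             run += 1
--             if run > 4:
--                 return False
--         else:
--             prev = c
--             run = 1
--     return True
-- ===== Notes on version B (the rewrite author's own statement) =====
-- stated objective: alternative
-- what changed: Replaces dict-based counting plus a scan over the counter's items with sort-then-single-pass run-length scanning of the concatenated hands (early exit on a run longer than 4).
import Mathlib
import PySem

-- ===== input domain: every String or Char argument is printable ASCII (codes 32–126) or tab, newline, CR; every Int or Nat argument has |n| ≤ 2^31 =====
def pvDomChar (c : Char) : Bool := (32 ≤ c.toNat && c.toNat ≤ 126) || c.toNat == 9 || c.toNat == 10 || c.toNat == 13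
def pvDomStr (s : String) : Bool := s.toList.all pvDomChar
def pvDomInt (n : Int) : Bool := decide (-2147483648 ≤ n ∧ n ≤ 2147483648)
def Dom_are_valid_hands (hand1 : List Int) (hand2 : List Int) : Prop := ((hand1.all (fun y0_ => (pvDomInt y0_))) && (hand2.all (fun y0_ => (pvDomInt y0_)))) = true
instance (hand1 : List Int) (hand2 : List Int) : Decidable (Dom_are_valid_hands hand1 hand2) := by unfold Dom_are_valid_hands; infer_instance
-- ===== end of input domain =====

-- B replaces dict counting with sort-then-run-length scan; same result, a different algorithm (no speed claim).

-- ===== PORT A =====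
-- the final 'for k,v in counts.items(): if v > 4: return False' loop, with its early return
def pvACheck : List (Int × Int) → Bool
  | [] => true
  | (_, v) :: rest => if v > 4 then false else pvACheck rest

def are_valid_hands (hand1 : List Int) (hand2 : List Int) : Bool :=
  -- counts = {}; two counting loops (counts[c] = counts.get(c, 0) + 1)
  let counts1 := hand1.foldl (fun d c => d.insert c (d.getD c 0 + 1)) (PySem.Dict.empty : PySem.Dict Int Int)
  let counts := hand2.foldl (fun d c => d.insert c (d.getD c 0 + 1)) counts1
  pvACheck counts.items

-- ===== PORT B =====
-- the scan loop: prev starts as None, run as 0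
def pvBLoop (prev : Option Int) (run : Int) : List Int → Bool
  | [] => true
  | c :: rest =>
      if some c = prev then
        if run + 1 > 4 then false else pvBLoop prev (run + 1) rest
      else pvBLoop (some c) 1 rest

def are_valid_hands_alt (hand1 : List Int) (hand2 : List Int) : Bool :=
  pvBLoop none 0 (PySem.List.sorted (hand1 ++ hand2) (fun x => x) false)

-- ===== PRECONDITION & SPEC =====
def Spec_are_valid_hands (hand1 : List Int) (hand2 : List Int) (out : Bool) : Prop := out = are_valid_hands_alt hand1 hand2
instance (hand1 : List Int) (hand2 : List Int) (out : Bool) : Decidable (Spec_are_valid_hands hand1 hand2 out) := by unfold Spec_are_valid_hands; infer_instance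

-- ===== CLAIM (what is proved, stated in full; the proofs are below) =====
def Claim_equal_are_valid_hands : Prop := ∀ (hand1 : List Int) (hand2 : List Int), Dom_are_valid_hands hand1 hand2 → Spec_are_valid_hands hand1 hand2 (are_valid_hands hand1 hand2)

-- ===== LEMMAS AND PROOFS =====

-- A's final loop is an 'all values ≤ 4' test
lemma pvACheck_eq_true_iff (l : List (Int × Int)) :
    pvACheck l = true ↔ ∀ p ∈ l, p.2 ≤ 4 := by
  induction l with
  | nil => simp [pvACheck]
  | cons hd tl ih =>
      obtain ⟨k, v⟩ := hd
      by_cases hv : v > 4 <;> simp [pvACheck, hv, ih] <;> omega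

-- A is the 'every card occurs at most 4 times in the combined hands' test
lemma are_valid_hands_iff (hand1 hand2 : List Int) :
    are_valid_hands hand1 hand2 = true ↔ ∀ x, (((hand1 ++ hand2).count x : Int)) ≤ 4 := by
  have hA : are_valid_hands hand1 hand2
      = pvACheck (PySem.Dict.counter (hand1 ++ hand2)).items := by
    show pvACheck ((hand2.foldl (fun d c => d.insert c (d.getD c 0 + 1))
        (hand1.foldl (fun d c => d.insert c (d.getD c 0 + 1)) PySem.Dict.empty)).items) = _
    rw [← List.foldl_append, PySem.Dict.foldl_insert_getD_add_one_eq_counter]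
  rw [hA, pvACheck_eq_true_iff]
  simp only [PySem.Dict.items_counter, List.mem_map]
  constructor
  · intro h x
    by_cases hx : x ∈ hand1 ++ hand2
    · exact h (x, (((hand1 ++ hand2).count x : Int))) ⟨x, by simp [PySem.Set.mem_ofList, hx]⟩
    · simp [List.count_eq_zero_of_not_mem hx]
  · rintro h p ⟨k, _, rfl⟩
    exact h k

-- B's scan on a nondecreasing tail: prev = some p already seen 'run' times, every
-- element of l is ≥ p, so the remaining copies of p are a prefix of l
lemma pvBLoop_some_iff (l : List Int) : ∀ (p r : Int), l.Pairwise (· ≤ ·) →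
    (∀ y ∈ l, p ≤ y) → r ≤ 4 →
    (pvBLoop (some p) r l = true ↔
      r + (l.count p : Int) ≤ 4 ∧ ∀ x, x ≠ p → ((l.count x : Int) ≤ 4)) := by
  induction l with
  | nil => intro p r _ _ hr; simp [pvBLoop, hr]
  | cons c rest ih =>
      intro p r hs hge hr
      rcases List.pairwise_cons.mp hs with ⟨hc, hrest⟩
      by_cases hcp : c = p
      · subst hcp
        rw [List.count_cons_self]
        by_cases hbig : r + 1 > 4
        · have hf : pvBLoop (some c) r (c :: rest) = false := by simp [pvBLoop, hbig]
          rw [hf]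
          constructor
          · intro h; cases h
          · rintro ⟨h1, _⟩; exfalso; push_cast at h1; omega
        · have hstep : pvBLoop (some c) r (c :: rest) = pvBLoop (some c) (r + 1) rest := by
            simp [pvBLoop, hbig]
          rw [hstep, ih c (r + 1) hrest hc (by omega)]
          constructor
          · rintro ⟨h1, h2⟩
            refine ⟨by push_cast at h1 ⊢; omega, fun x hx => ?_⟩
            rw [List.count_cons_of_ne (Ne.symm hx)]; exact h2 x hx
          · rintro ⟨h1, h2⟩
            push_cast at h1
            refine ⟨by push_cast; omega, fun x hx => ?_⟩
            have := h2 x hx; rwa [List.count_cons_of_ne (Ne.symm hx)] at this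
      · have hpc : p < c := lt_of_le_of_ne (hge c (List.mem_cons_self ..)) (Ne.symm hcp)
        have hcnt_p : rest.count p = 0 := by
          apply List.count_eq_zero_of_not_mem
          intro hmem
          have := hc p hmem; omega
        have hstep : pvBLoop (some p) r (c :: rest) = pvBLoop (some c) 1 rest := by
          simp [pvBLoop, hcp]
        have hcount_pc : (c :: rest).count p = 0 := by
          rw [List.count_cons_of_ne (ne_of_gt hpc), hcnt_p]
        rw [hstep, hcount_pc, ih c 1 hrest hc (by omega)]
        constructor
        · rintro ⟨h1, h2⟩
          refine ⟨by push_cast; omega, fun x hx => ?_⟩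
          by_cases hxc : x = c
          · subst hxc; rw [List.count_cons_self]; push_cast at h1 ⊢; omega
          · rw [List.count_cons_of_ne (Ne.symm hxc)]; exact h2 x hxc
        · rintro ⟨_, h2⟩
          refine ⟨?_, fun x hx => ?_⟩
          · have := h2 c hcp
            rw [List.count_cons_self] at this; push_cast at this ⊢; omega
          · by_cases hxp : x = p
            · subst hxp; rw [hcnt_p]; omega
            · have := h2 x hxp; rwa [List.count_cons_of_ne (Ne.symm hx)] at this

-- B is the same 'every card occurs at most 4 times' test
lemma are_valid_hands_alt_iff (hand1 hand2 : List Int) :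
    are_valid_hands_alt hand1 hand2 = true ↔ ∀ x, (((hand1 ++ hand2).count x : Int)) ≤ 4 := by
  unfold are_valid_hands_alt
  have hperm : (PySem.List.sorted (hand1 ++ hand2) (fun x => x) false).Perm (hand1 ++ hand2) :=
    PySem.List.sorted_perm ..
  have hcnt : ∀ x, (PySem.List.sorted (hand1 ++ hand2) (fun x => x) false).count x
      = (hand1 ++ hand2).count x := fun x => hperm.count_eq x
  have hpw : (PySem.List.sorted (hand1 ++ hand2) (fun x => x) false).Pairwise (· ≤ ·) :=
    PySem.List.sorted_pairwise ..
  cases hsl : PySem.List.sorted (hand1 ++ hand2) (fun x => x) false with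
  | nil =>
      have h0 : ∀ x, (hand1 ++ hand2).count x = 0 := fun x => by rw [← hcnt x, hsl]; simp
      simp [pvBLoop, h0]
  | cons c rest =>
      rw [hsl] at hpw hcnt
      rcases List.pairwise_cons.mp hpw with ⟨hc, hrest⟩
      have hstep : pvBLoop none 0 (c :: rest) = pvBLoop (some c) 1 rest := by simp [pvBLoop]
      rw [hstep, pvBLoop_some_iff rest c 1 hrest hc (by omega)]
      constructor
      · rintro ⟨h1, h2⟩ x
        rw [← hcnt x]
        by_cases hxc : x = c
        · subst hxc; rw [List.count_cons_self]; push_cast at h1 ⊢; omega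
        · rw [List.count_cons_of_ne (Ne.symm hxc)]; exact h2 x hxc
      · intro h
        refine ⟨?_, fun x hx => ?_⟩
        · have := h c; rw [← hcnt c, List.count_cons_self] at this
          push_cast at this ⊢; omega
        · have := h x; rwa [← hcnt x, List.count_cons_of_ne (Ne.symm hx)] at this

-- ===== VERDICT (by name: the statement is the Claim_ definition above) =====
theorem are_valid_hands_spec : Claim_equal_are_valid_hands := by
  intro hand1 hand2 _
  unfold Spec_are_valid_hands
  rcases hb : are_valid_hands_alt hand1 hand2 with _ | _
  · rcases ha : are_valid_hands hand1 hand2 with _ | _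
    · rfl
    · exact absurd ((are_valid_hands_alt_iff hand1 hand2).mpr
        ((are_valid_hands_iff hand1 hand2).mp ha)) (by simp [hb])
  · exact (are_valid_hands_iff hand1 hand2).mpr
      ((are_valid_hands_alt_iff hand1 hand2).mp hb)
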